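-- pv_equiv track=rewrite | github.com/jeffrichley/algoviz | collect_issues.py | distribute_files
-- ===== SOURCE A (Python) =====
-- def distribute_files(files_with_issues, num_agents):
--     """Distribute files evenly among agents based on issue count."""
--     if num_agents <= 0:
--         return {}
--
--     # Sort files by issue count (heaviest first)
--     sorted_files = sorted(files_with_issues.items(), key=lambda x: x[1], reverse=True)
--
--     # Initialize agent workloads
--     agent_workloads = [[] for _ in range(num_agents)]
--     agent_totals = [0] * num_agents
--
--     # Distribute files using round-robin with weights
--     for filename, issue_count in sorted_files:
--         # Find agent with smallest current workload
--         min_agent = min(range(num_agents), key=lambda i: agent_totals[i])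
--
--         # Assign file to that agent
--         agent_workloads[min_agent].append(filename)
--         agent_totals[min_agent] += issue_count
--
--     return agent_workloads
-- ===== SOURCE B (Python) =====
-- def _insort(x, ys):
--     """Insert x into the ascending-sorted list ys, keeping it sorted."""
--     k = 0
--     while k < len(ys) and ys[k] < x:
--         k += 1
--     return ys[:k] + [x] + ys[k:]
--
--
-- def distribute_files(files_with_issues, num_agents):
--     """Distribute files evenly among agents based on issue count."""
--     if num_agents <= 0:
--         return []
--
--     order = sorted(files_with_issues.items(), key=lambda x: x[1], reverse=True)
--
--     workloads = [[] for _ in range(num_agents)]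
--     # priority queue kept as a list sorted ascending by (total, agent index):
--     # the head is always the least-loaded agent (lowest index on ties)
--     queue = [(0, i) for i in range(num_agents)]
--
--     for filename, issue_count in order:
--         total, agent = queue[0]
--         workloads[agent].append(filename)
--         queue = _insort((total + issue_count, agent), queue[1:])
--
--     return workloads
-- ===== Notes on version B (the rewrite author's own statement) =====
-- stated objective: alternative
-- what changed: B replaces A's per-file linear argmin scan over all agent totals with a maintained sorted priority list of (total, agent) pairs: the least-loaded agent is popped from the head and re-inserted at its sorted position.
-- outside the precondition, e.g. on distribute_files({'x': 3}, 0): A returns {}, B returns []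
import Mathlib
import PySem

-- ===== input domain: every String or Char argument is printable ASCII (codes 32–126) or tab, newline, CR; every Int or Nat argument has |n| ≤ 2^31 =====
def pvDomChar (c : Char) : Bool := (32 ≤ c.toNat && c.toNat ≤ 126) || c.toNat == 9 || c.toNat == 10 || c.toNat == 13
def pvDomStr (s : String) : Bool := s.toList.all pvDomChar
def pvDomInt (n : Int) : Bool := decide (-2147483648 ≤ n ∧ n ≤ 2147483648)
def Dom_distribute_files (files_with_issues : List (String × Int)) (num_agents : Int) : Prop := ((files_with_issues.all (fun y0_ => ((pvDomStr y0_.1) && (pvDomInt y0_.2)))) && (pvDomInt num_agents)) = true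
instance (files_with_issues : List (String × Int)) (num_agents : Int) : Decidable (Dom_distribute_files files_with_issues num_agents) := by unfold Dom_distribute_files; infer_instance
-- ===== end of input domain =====

-- B replaces A's per-file linear argmin scan over the agent totals with a sorted
-- priority list of (total, index) pairs (pop head, re-insert in order); equivalence
-- is proved for num_agents > 0 and duplicate-free filenames.


-- ===== PORT A =====
def distribute_files (files_with_issues : List (String × Int)) (num_agents : Int) : List (List String) :=
  if num_agents ≤ 0 then []
  else
    let sorted_files := PySem.List.sorted files_with_issues (fun x => x.2) true
    let st := sorted_files.foldl
      (fun (st : List (List String) × List Int) fc =>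
        let min_agent : Int :=
          (PySem.List.min? (PySem.List.pyRange 0 num_agents 1) (fun i => PySem.List.pyGetD st.2 i 0)).getD 0
        (PySem.List.pySetD st.1 min_agent (PySem.List.pyGetD st.1 min_agent [] ++ [fc.1]),
         PySem.List.pySetD st.2 min_agent (PySem.List.pyGetD st.2 min_agent 0 + fc.2)))
      ((PySem.List.pyRange 0 num_agents 1).map (fun _ => ([] : List String)),
       List.replicate num_agents.toNat (0 : Int))
    st.1

-- ===== PORT B =====
-- linear scan for the insertion point (Python's while loop), then splice;
-- ys[:k] + [x] + ys[k:] is exact as take/drop since 0 ≤ k ≤ len ys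
def pvFindPos (x : Int × Int) : List (Int × Int) → Nat
  | [] => 0
  | y :: ys =>
    if y.1 < x.1 || (y.1 == x.1 && y.2 < x.2) then 1 + pvFindPos x ys else 0

def pvInsort (x : Int × Int) (ys : List (Int × Int)) : List (Int × Int) :=
  ys.take (pvFindPos x ys) ++ x :: ys.drop (pvFindPos x ys)

def distribute_files_alt (files_with_issues : List (String × Int)) (num_agents : Int) : List (List String) :=
  if num_agents ≤ 0 then []
  else
    let order := PySem.List.sorted files_with_issues (fun x => x.2) true
    let st := order.foldl
      (fun (st : List (List String) × List (Int × Int)) fc =>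
        match st.2 with
        | [] => st   -- unreachable: the queue always holds num_agents > 0 pairs
        | (t, i) :: rest =>
          (PySem.List.pySetD st.1 i (PySem.List.pyGetD st.1 i [] ++ [fc.1]),
           pvInsort (t + fc.2, i) rest))
      ((PySem.List.pyRange 0 num_agents 1).map (fun _ => ([] : List String)),
       (PySem.List.pyRange 0 num_agents 1).map (fun i => ((0 : Int), i)))
    st.1

-- ===== PRECONDITION & SPEC =====
-- Pre_ excludes num_agents ≤ 0, where A returns an empty dict {} rather than a value of the
-- declared list-of-lists type, and lists with duplicate filenames, which are not representable
-- as a Python dict input at all.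
def Pre_distribute_files (files_with_issues : List (String × Int)) (num_agents : Int) : Prop :=
  0 < num_agents ∧ (files_with_issues.map Prod.fst).Nodup

instance (files_with_issues : List (String × Int)) (num_agents : Int) : Decidable (Pre_distribute_files files_with_issues num_agents) := by unfold Pre_distribute_files; infer_instance

def pvWitness_distribute_files : (List (String × Int)) × Int := ([("a", 2), ("b", 1)], 2)

def Spec_distribute_files (files_with_issues : List (String × Int)) (num_agents : Int) (out : List (List String)) : Prop := out = distribute_files_alt files_with_issues num_agents
instance (files_with_issues : List (String × Int)) (num_agents : Int) (out : List (List String)) : Decidable (Spec_distribute_files files_with_issues num_agents out) := by unfold Spec_distribute_files; infer_instance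

-- ===== CLAIM (what is proved, stated in full; the proofs are below) =====
def Claim_equal_distribute_files : Prop := ∀ (files_with_issues : List (String × Int)) (num_agents : Int), Dom_distribute_files files_with_issues num_agents → Pre_distribute_files files_with_issues num_agents → Spec_distribute_files files_with_issues num_agents (distribute_files files_with_issues num_agents)

-- ===== LEMMAS AND PROOFS =====

def pvInsortRec (x : Int × Int) : List (Int × Int) → List (Int × Int)
  | [] => [x]
  | y :: ys =>
    if y.1 < x.1 || (y.1 == x.1 && y.2 < x.2) then y :: pvInsortRec x ys else x :: y :: ys

theorem pvInsort_eq_rec (x : Int × Int) : ∀ (ys : List (Int × Int)), pvInsort x ys = pvInsortRec x ys := by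
  intro ys
  induction ys with
  | nil => rfl
  | cons y ys ih =>
    by_cases h : (y.1 < x.1 || (y.1 == x.1 && y.2 < x.2)) = true
    · simp only [pvInsort, pvInsortRec, pvFindPos, if_pos h] at ih ⊢
      rw [← ih]
      simp [List.take_succ_cons, Nat.add_comm]
    · simp only [pvInsort, pvInsortRec, pvFindPos, if_neg h]
      simp


def pvPairsFrom (s : Int) (T : List Int) : List (Int × Int) :=
  (PySem.List.enumerate T s).map (fun p => (p.2, p.1))

def PvLex (a b : Int × Int) : Prop := a.1 < b.1 ∨ (a.1 = b.1 ∧ a.2 < b.2)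

theorem pvLex_trans {a b c : Int × Int} (h1 : PvLex a b) (h2 : PvLex b c) : PvLex a c := by
  rcases h1 with h | ⟨h, h'⟩ <;> rcases h2 with g | ⟨g, g'⟩ <;> unfold PvLex <;> omega

theorem pvLex_total {a b : Int × Int} (hne : a.2 ≠ b.2) : PvLex a b ∨ PvLex b a := by
  unfold PvLex; omega

theorem pvLex_bool {a b : Int × Int} :
    (a.1 < b.1 || (a.1 == b.1 && a.2 < b.2)) = true ↔ PvLex a b := by
  simp [PvLex]

theorem mem_pvPairsFrom {s : Int} {T : List Int} {p : Int × Int} :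
    p ∈ pvPairsFrom s T ↔ ∃ (k : Nat) (h : k < T.length), p = (T[k], s + k) := by
  simp only [pvPairsFrom, List.mem_map, PySem.List.mem_enumerate_iff]
  constructor
  · rintro ⟨q, ⟨k, hk, rfl⟩, rfl⟩; exact ⟨k, hk, rfl⟩
  · rintro ⟨k, hk, rfl⟩; exact ⟨(s + k, T[k]), ⟨k, hk, rfl⟩, rfl⟩

theorem map_snd_pvPairsFrom (s : Int) (T : List Int) :
    (pvPairsFrom s T).map (·.2) = PySem.List.pyRange s (s + (T.length : Int)) 1 := by
  have h : (pvPairsFrom s T).map (·.2)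
      = (PySem.List.enumerate T s).map (·.1) := by
    simp [pvPairsFrom, List.map_map, Function.comp]
  rw [h, PySem.List.map_fst_enumerate]

-- min? foldl lemmas
theorem pvFoldl_keep {α κ : Type} [LT κ] [DecidableLT κ] (key : α → κ) (m : α) :
    ∀ (bs : List α), (∀ b ∈ bs, ¬ key b < key m) →
    bs.foldl (fun acc x => match acc with
      | none => some x
      | some m' => if key x < key m' then some x else some m') (some m) = some m := by
  intro bs
  induction bs with
  | nil => intro _; rfl
  | cons b bs ih =>
    intro h
    simp only [List.foldl_cons]
    rw [if_neg (h b (by simp))]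
    exact ih (fun x hx => h x (by simp [hx]))

theorem pvFoldl_mid {α κ : Type} [LT κ] [DecidableLT κ] (key : α → κ)
 (m : α) :
    ∀ (as : List α) (c : α) (bs : List α), key m < key c → (∀ a ∈ as, key m < key a) →
    (∀ b ∈ bs, ¬ key b < key m) →
    (as ++ m :: bs).foldl (fun acc x => match acc with
      | none => some x
      | some m' => if key x < key m' then some x else some m') (some c) = some m := by
  intro as
  induction as with
  | nil =>
    intro c bs hc _ hb
    simp only [List.nil_append, List.foldl_cons]
    rw [if_pos hc]
    exact pvFoldl_keep key m bs hb
  | cons a as ih =>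
    intro c bs hc ha hb
    simp only [List.cons_append, List.foldl_cons]
    by_cases h : key a < key c
    · rw [if_pos h]
      exact ih a bs (ha a (by simp)) (fun x hx => ha x (by simp [hx])) hb
    · rw [if_neg h]
      exact ih c bs hc (fun x hx => ha x (by simp [hx])) hb

theorem pvMin?_split {α κ : Type} [LT κ] [DecidableLT κ] (key : α → κ)
 (as : List α) (m : α) (bs : List α)
    (ha : ∀ a ∈ as, key m < key a) (hb : ∀ b ∈ bs, ¬ key b < key m) :
    PySem.List.min? (as ++ m :: bs) key = some m := by
  unfold PySem.List.min?
  cases as with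
  | nil =>
    simp only [List.nil_append, List.foldl_cons]
    exact pvFoldl_keep key m bs hb
  | cons a as =>
    simp only [List.cons_append, List.foldl_cons]
    exact pvFoldl_mid key m as a bs (ha a (by simp)) (fun x hx => ha x (by simp [hx])) hb


theorem pvInsortRec_perm (x : Int × Int) : ∀ (ys : List (Int × Int)), (pvInsortRec x ys).Perm (x :: ys) := by
  intro ys
  induction ys with
  | nil => simp [pvInsortRec]
  | cons y ys ih =>
    by_cases h : (y.1 < x.1 || (y.1 == x.1 && y.2 < x.2)) = true
    · simp only [pvInsortRec, if_pos h]
      exact (ih.cons y).trans (List.Perm.swap x y ys)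
    · simp only [pvInsortRec, if_neg h]
      exact List.Perm.refl _

theorem pvInsortRec_pairwise (x : Int × Int) :
    ∀ (ys : List (Int × Int)), ys.Pairwise PvLex → (∀ y ∈ ys, y.2 ≠ x.2) →
    (pvInsortRec x ys).Pairwise PvLex := by
  intro ys
  induction ys with
  | nil => intro _ _; simp [pvInsortRec]
  | cons y ys ih =>
    intro hp hne
    rcases List.pairwise_cons.1 hp with ⟨hy, hys⟩
    by_cases h : (y.1 < x.1 || (y.1 == x.1 && y.2 < x.2)) = true
    · simp only [pvInsortRec, if_pos h]
      refine List.pairwise_cons.2 ⟨?_, ih hys (fun z hz => hne z (by simp [hz]))⟩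
      intro z hz
      have := (pvInsortRec_perm x ys).mem_iff.1 hz
      rcases List.mem_cons.1 this with rfl | hzz
      · exact pvLex_bool.1 h
      · exact hy z hzz
    · simp only [pvInsortRec, if_neg h]
      have hxy : PvLex x y := by
        rcases pvLex_total (hne y (by simp)) with hh | hh
        · exact absurd (pvLex_bool.2 hh) h
        · exact hh
      refine List.pairwise_cons.2 ⟨?_, hp⟩
      intro z hz
      rcases List.mem_cons.1 hz with rfl | hzz
      · exact hxy
      · exact pvLex_trans hxy (hy z hzz)

theorem pvPairsFrom_set (v : Int) :
    ∀ (T : List Int) (s : Int) (k : Nat) (hk : k < T.length),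
    ∃ P₁ P₂, pvPairsFrom s T = P₁ ++ (T[k], s + k) :: P₂ ∧
      pvPairsFrom s (T.set k v) = P₁ ++ (v, s + k) :: P₂ := by
  intro T
  induction T with
  | nil => intro s k hk; simp at hk
  | cons a T ih =>
    intro s k hk
    cases k with
    | zero =>
      refine ⟨[], pvPairsFrom (s + 1) T, ?_, ?_⟩ <;>
        simp [pvPairsFrom, PySem.List.enumerate_cons]
    | succ k =>
      have hk' : k < T.length := by simpa using hk
      obtain ⟨P₁, P₂, h1, h2⟩ := ih (s + 1) k hk'
      have hcast : (s + 1) + (k : Int) = s + ((k + 1 : Nat) : Int) := by push_cast; ring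
      refine ⟨(a, s) :: P₁, P₂, ?_, ?_⟩
      · simp only [pvPairsFrom, PySem.List.enumerate_cons, List.map_cons] at h1 ⊢
        rw [h1, hcast]
        simp [List.cons_append]
      · simp only [pvPairsFrom, List.set_cons_succ, PySem.List.enumerate_cons, List.map_cons] at h2 ⊢
        rw [h2, hcast]
        simp [List.cons_append]

theorem pvHead_min (T : List Int) (n : Int) (t i : Int) (rest : List (Int × Int))
    (hlen : T.length = n.toNat) (hn : 0 < n)
    (hperm : ((t, i) :: rest).Perm (pvPairsFrom 0 T))
    (hpair : ((t, i) :: rest).Pairwise PvLex) :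
    (∃ (k : Nat) (hk : k < T.length), i = (k : Int) ∧ t = T[k]) ∧
    PySem.List.min? (PySem.List.pyRange 0 n 1) (fun j => PySem.List.pyGetD T j 0) = some i := by
  have hmem : (t, i) ∈ pvPairsFrom 0 T := hperm.mem_iff.1 (by simp)
  obtain ⟨k, hk, hki⟩ := mem_pvPairsFrom.1 hmem
  have ht : t = T[k] := by simpa using congrArg Prod.fst hki
  have hi : i = (k : Int) := by simpa using congrArg Prod.snd hki
  refine ⟨⟨k, hk, hi, ht⟩, ?_⟩
  have hP : ∀ p ∈ pvPairsFrom 0 T, p = (t, i) ∨ PvLex (t, i) p := by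
    intro p hp
    have := hperm.symm.mem_iff.1 hp
    rcases List.mem_cons.1 this with h | h
    · exact Or.inl h
    · exact Or.inr ((List.pairwise_cons.1 hpair).1 p h)
  have hk' : k < n.toNat := by rw [← hlen]; exact hk
  have hin : i < n := by omega
  have hi0 : 0 ≤ i := by omega
  have hcons : PySem.List.pyRange i n 1 = i :: PySem.List.pyRange (i + 1) n 1 :=
    PySem.List.pyRange_one_cons hin
  rw [PySem.List.pyRange_one_append 0 i n hi0 (by omega), hcons]
  have hkey : PySem.List.pyGetD T i 0 = t := by
    rw [hi, PySem.List.pyGetD_natCast, List.getD_eq_getElem _ _ hk, ht]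
  apply pvMin?_split
  · intro a ha
    rcases PySem.List.mem_pyRange_one.1 ha with ⟨ha0, hai⟩
    have hmk : a.toNat < k := by omega
    have hmlen : a.toNat < T.length := by omega
    have ham : a = ((a.toNat : Nat) : Int) := by omega
    rw [hkey, ham, PySem.List.pyGetD_natCast, List.getD_eq_getElem _ _ hmlen]
    have hmm : ((T[a.toNat]'hmlen, ((a.toNat : Nat) : Int)) : Int × Int) ∈ pvPairsFrom 0 T :=
      mem_pvPairsFrom.2 ⟨a.toNat, hmlen, by simp⟩
    rcases hP _ hmm with h | h
    · exfalso
      have := congrArg Prod.snd h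
      simp [hi] at this
      omega
    · rcases h with h | ⟨h, h'⟩
      · exact h
      · exfalso; rw [hi] at h'; simp at h'; omega
  · intro b hb
    rcases PySem.List.mem_pyRange_one.1 hb with ⟨hb0, hbn⟩
    have hmlen : b.toNat < T.length := by omega
    have hbm : b = ((b.toNat : Nat) : Int) := by omega
    rw [hkey, hbm, PySem.List.pyGetD_natCast, List.getD_eq_getElem _ _ hmlen]
    have hmm : ((T[b.toNat]'hmlen, ((b.toNat : Nat) : Int)) : Int × Int) ∈ pvPairsFrom 0 T :=
      mem_pvPairsFrom.2 ⟨b.toNat, hmlen, by simp⟩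
    rcases hP _ hmm with h | h
    · have : T[b.toNat]'hmlen = t := by simpa using congrArg Prod.fst h
      omega
    · rcases h with h | ⟨h, h'⟩
      · omega
      · omega

def pvStepA (n : Int) (st : List (List String) × List Int) (fc : String × Int) :
    List (List String) × List Int :=
  let min_agent : Int :=
    (PySem.List.min? (PySem.List.pyRange 0 n 1) (fun i => PySem.List.pyGetD st.2 i 0)).getD 0
  (PySem.List.pySetD st.1 min_agent (PySem.List.pyGetD st.1 min_agent [] ++ [fc.1]),
   PySem.List.pySetD st.2 min_agent (PySem.List.pyGetD st.2 min_agent 0 + fc.2))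

def pvStepB (st : List (List String) × List (Int × Int)) (fc : String × Int) :
    List (List String) × List (Int × Int) :=
  match st.2 with
  | [] => st
  | (t, i) :: rest =>
    (PySem.List.pySetD st.1 i (PySem.List.pyGetD st.1 i [] ++ [fc.1]),
     pvInsort (t + fc.2, i) rest)

theorem pvLoop (n : Int) (hn : 0 < n) :
    ∀ (L : List (String × Int)) (W : List (List String)) (T : List Int) (q : List (Int × Int)),
    T.length = n.toNat → q.Perm (pvPairsFrom 0 T) → q.Pairwise PvLex →
    (L.foldl (pvStepA n) (W, T)).1 = (L.foldl pvStepB (W, q)).1 := by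
  intro L
  induction L with
  | nil => intro W T q _ _ _; rfl
  | cons fc L ih =>
    intro W T q hlen hperm hpair
    have hT : 0 < T.length := by omega
    have hq : q ≠ [] := by
      intro h
      rw [h] at hperm
      have := hperm.length_eq
      simp [pvPairsFrom] at this
      omega
    rcases q with _ | ⟨⟨t, i⟩, rest⟩
    · exact absurd rfl hq
    obtain ⟨⟨k, hk, hi, ht⟩, hmin⟩ := pvHead_min T n t i rest hlen hn hperm hpair
    -- A's chosen agent is i
    have hkey : PySem.List.pyGetD T i 0 = t := by
      rw [hi, PySem.List.pyGetD_natCast, List.getD_eq_getElem _ _ hk, ht]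
    have hstepA : pvStepA n (W, T) fc =
        (PySem.List.pySetD W i (PySem.List.pyGetD W i [] ++ [fc.1]), T.set k (t + fc.2)) := by
      simp only [pvStepA, hmin, Option.getD_some, hkey]
      rw [PySem.List.pySetD_of_nonneg T (t + fc.2) (show (0:Int) ≤ i by omega)]
      have hik : i.toNat = k := by omega
      rw [hik]
    have hstepB : pvStepB (W, (t, i) :: rest) fc =
        (PySem.List.pySetD W i (PySem.List.pyGetD W i [] ++ [fc.1]), pvInsortRec (t + fc.2, i) rest) := by
      simp only [pvStepB, pvInsort_eq_rec]
    -- new invariants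
    obtain ⟨P₁, P₂, h1, h2⟩ := pvPairsFrom_set (t + fc.2) T 0 k hk
    have h1' : pvPairsFrom 0 T = P₁ ++ (t, i) :: P₂ := by
      rw [h1, ← ht, hi]; norm_num
    have h2' : pvPairsFrom 0 (T.set k (t + fc.2)) = P₁ ++ (t + fc.2, i) :: P₂ := by
      rw [h2, hi]; norm_num
    have hrest : rest.Perm (P₁ ++ P₂) := by
      have : ((t, i) :: rest).Perm ((t, i) :: (P₁ ++ P₂)) := by
        rw [h1'] at hperm
        exact hperm.trans List.perm_middle
      exact this.cons_inv
    have hperm' : (pvInsortRec (t + fc.2, i) rest).Perm (pvPairsFrom 0 (T.set k (t + fc.2))) := by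
      rw [h2']
      exact ((pvInsortRec_perm _ rest).trans (hrest.cons _)).trans List.perm_middle.symm
    have hne : ∀ y ∈ rest, y.2 ≠ i := by
      have hnodup : (((t, i) :: rest).map (·.2)).Nodup := by
        rw [(hperm.map (·.2)).nodup_iff, map_snd_pvPairsFrom]
        exact PySem.List.nodup_pyRange_one _ _
      simp only [List.map_cons, List.nodup_cons] at hnodup
      intro y hy hyi
      exact hnodup.1 (List.mem_map.2 ⟨y, hy, hyi⟩)
    have hpair' : (pvInsortRec (t + fc.2, i) rest).Pairwise PvLex :=
      pvInsortRec_pairwise _ rest (List.Pairwise.of_cons hpair) hne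
    have hlen' : (T.set k (t + fc.2)).length = n.toNat := by
      rw [List.length_set]; exact hlen
    simp only [List.foldl_cons, hstepA, hstepB]
    exact ih _ _ _ hlen' hperm' hpair'

theorem pv_main (fwi : List (String × Int)) (n : Int) (hn : 0 < n) :
    distribute_files fwi n = distribute_files_alt fwi n := by
  have hinit : ((PySem.List.pyRange 0 n 1).map (fun i => ((0 : Int), i)))
      = pvPairsFrom 0 (List.replicate n.toNat (0 : Int)) := by
    unfold pvPairsFrom
    rw [PySem.List.enumerate_eq_map_pyRange (List.replicate n.toNat (0 : Int)) 0]
    rw [List.map_map]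
    have hlenr : PySem.List.len (List.replicate n.toNat (0 : Int)) = n := by
      simp [PySem.List.len]
      omega
    rw [hlenr]
    apply List.map_congr_left
    intro j hj
    rcases PySem.List.mem_pyRange_one.1 hj with ⟨hj0, hjn⟩
    have hjl : j.toNat < n.toNat := by omega
    simp only [Function.comp]
    rw [PySem.List.pyGetD_of_nonneg _ _ hj0,
      List.getD_eq_getElem _ _ (by simpa using hjl), List.getElem_replicate]
  have hpair0 : (((PySem.List.pyRange 0 n 1).map (fun i => ((0 : Int), i)))).Pairwise PvLex := by
    rw [List.pairwise_map]
    exact (PySem.List.pairwise_lt_pyRange_one 0 n).imp (fun h => Or.inr ⟨rfl, h⟩)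
  have key := pvLoop n hn (PySem.List.sorted fwi (fun x => x.2) true)
    ((PySem.List.pyRange 0 n 1).map (fun _ => ([] : List String)))
    (List.replicate n.toNat (0 : Int))
    ((PySem.List.pyRange 0 n 1).map (fun i => ((0 : Int), i)))
    (by simp) (by rw [hinit]) hpair0
  unfold distribute_files distribute_files_alt
  rw [if_neg (by omega), if_neg (by omega)]
  exact key

-- ===== VERDICT (by name: the statement is the Claim_ definition above) =====
theorem distribute_files_spec : Claim_equal_distribute_files := by
  intro fwi n _ hpre
  unfold Spec_distribute_files
  exact pv_main fwi n hpre.1
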